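-- pv_equiv track=rewrite | github.com/qihangZH/nlptoolkits | nlptoolkits/GensimKits/Wrd2vScorerT.py | score_one_document_tf
-- ===== SOURCE A (Python) =====
-- from collections import Counter, OrderedDict, defaultdict
--
-- def score_one_document_tf(document, expanded_words, list_of_list=False):
--     """score a single document using term freq, the dimensions are sorted alphabetically
--
--     Arguments:
--         document {str} -- a document
--         expanded_words {dict[str, set(str)]} -- an expanded dictionary
--
--     Keyword Arguments:
--         list_of_list {bool} -- whether the document is splitted (default: {False})
--
--     Returns:
--         [int] -- a list of : dim1, dim2, ... , document_length
--     """
--     if list_of_list is False: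
--         document = document.split()
--     dimension_count = OrderedDict()
--     for dimension in expanded_words:
--         dimension_count[dimension] = 0
--     c = Counter(document)
--     for pair in c.items():
--         for dimension, words in expanded_words.items():
--             if pair[0] in words:
--                 dimension_count[dimension] += pair[1]
--     # use ordereddict to maintain order of count for each dimension
--     dimension_count = OrderedDict(sorted(dimension_count.items(), key=lambda t: t[0]))
--     result = list(dimension_count.values())
--     result.append(len(document))
--     return result
-- ===== SOURCE B (Python) =====
-- from collections import Counter
--
-- def score_one_document_tf(document, expanded_words, list_of_list=False):
--     """Counter once, then one pass over the sorted dimensions, summing counter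
--     lookups of that dimension's distinct words."""
--     if list_of_list is False:
--         document = document.split()
--     cnt = Counter(document)
--     result = [sum(cnt[w] for w in set(expanded_words[dim]))
--               for dim in sorted(expanded_words)]
--     result.append(len(document))
--     return result
-- ===== Notes on version B (the rewrite author's own statement) =====
-- stated objective: simpler
-- what changed: B inverts the loop nesting: instead of A's per-unique-token scan over every dimension's word collection accumulating into an ordered dict that is then sorted, B builds the Counter once and computes each sorted dimension's score directly as the sum of counter lookups over that dimension's distinct words.
import Mathlib
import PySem

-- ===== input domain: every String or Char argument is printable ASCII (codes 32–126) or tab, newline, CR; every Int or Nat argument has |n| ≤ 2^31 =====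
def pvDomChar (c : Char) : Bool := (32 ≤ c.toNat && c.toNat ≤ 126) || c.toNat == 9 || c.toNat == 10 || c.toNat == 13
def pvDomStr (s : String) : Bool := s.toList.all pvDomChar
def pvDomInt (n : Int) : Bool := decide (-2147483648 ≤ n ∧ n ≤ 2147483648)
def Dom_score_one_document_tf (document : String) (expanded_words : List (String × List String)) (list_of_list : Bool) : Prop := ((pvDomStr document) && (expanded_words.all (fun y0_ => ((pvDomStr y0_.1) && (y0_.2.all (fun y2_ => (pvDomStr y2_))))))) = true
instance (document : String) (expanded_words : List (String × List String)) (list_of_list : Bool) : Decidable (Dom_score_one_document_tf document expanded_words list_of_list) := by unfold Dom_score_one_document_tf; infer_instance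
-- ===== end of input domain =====

-- B builds the token Counter once and computes each sorted dimension's score directly as
-- the sum of counter lookups over that dimension's distinct words (no running totals dict).

-- shared line 'if list_of_list is False: document = document.split()' (with list_of_list=True the
-- str document is iterated by Python as its characters, i.e. one-character strings)
def pvTokens (document : String) (list_of_list : Bool) : List String :=
  if list_of_list = false then PySem.Str.split₀ document
  else document.toList.map (fun c => String.ofList [c])

-- ===== PORT A =====
def score_one_document_tf (document : String) (expanded_words : List (String × List String)) (list_of_list : Bool) : List Int :=
  let doc := pvTokens document list_of_list
  let ew : PySem.Dict String (List String) := PySem.Dict.ofList expanded_words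
  -- dimension_count = OrderedDict(); for dimension in expanded_words: dimension_count[dimension] = 0
  let dc0 : PySem.Dict String Int := ew.keys.foldl (fun d k => d.insert k 0) PySem.Dict.empty
  -- c = Counter(document)
  let c : PySem.Dict String Int := PySem.Dict.counter doc
  -- for pair in c.items(): for dimension, words in expanded_words.items(): if pair[0] in words: dimension_count[dimension] += pair[1]
  let dc := c.items.foldl (fun d pair =>
      ew.items.foldl (fun d p => if pair.1 ∈ p.2 then d.modify p.1 0 (· + pair.2) else d) d) dc0
  -- sorted items by key, values, append len(document)
  (PySem.List.sorted dc.items (fun t => t.1) false).map (fun t => t.2) ++ [PySem.List.len doc]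

-- ===== PORT B =====
def score_one_document_tf_alt (document : String) (expanded_words : List (String × List String)) (list_of_list : Bool) : List Int :=
  let doc := pvTokens document list_of_list
  -- cnt = Counter(document)
  let cnt : PySem.Dict String Int := PySem.Dict.counter doc
  let ew : PySem.Dict String (List String) := PySem.Dict.ofList expanded_words
  -- [sum(cnt[w] for w in set(expanded_words[dim])) for dim in sorted(expanded_words)] + [len(document)]
  (PySem.List.sorted ew.keys (fun k => k) false).map
      (fun dim => ((PySem.Set.ofList (ew.getD dim [])).map (fun w => cnt.getD w 0)).sum)
    ++ [PySem.List.len doc]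

-- ===== PRECONDITION & SPEC =====
def Spec_score_one_document_tf (document : String) (expanded_words : List (String × List String)) (list_of_list : Bool) (out : List Int) : Prop := out = score_one_document_tf_alt document expanded_words list_of_list
instance (document : String) (expanded_words : List (String × List String)) (list_of_list : Bool) (out : List Int) : Decidable (Spec_score_one_document_tf document expanded_words list_of_list out) := by unfold Spec_score_one_document_tf; infer_instance

-- ===== CLAIM (what is proved, stated in full; the proofs are below) =====
def Claim_equal_score_one_document_tf : Prop := ∀ (document : String) (expanded_words : List (String × List String)) (list_of_list : Bool), Dom_score_one_document_tf document expanded_words list_of_list → Spec_score_one_document_tf document expanded_words list_of_list (score_one_document_tf document expanded_words list_of_list)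

-- ===== LEMMAS AND PROOFS =====

-- the zero-initialised dict over the dimension keys
theorem pvBase_getD (l : List String) (d : PySem.Dict String Int) (k : String)
    (h : d.getD k 0 = 0) :
    (l.foldl (fun d k => d.insert k 0) d).getD k 0 = 0 := by
  induction l generalizing d with
  | nil => exact h
  | cons x xs ih =>
      simp only [List.foldl_cons]
      exact ih _ (by rw [PySem.Dict.getD_insert]; split <;> simp [h])

theorem pvBase_keys (l : List String) (hnd : l.Nodup) :
    ((l.foldl (fun d k => d.insert k (0 : Int)) PySem.Dict.empty)).keys = l := by
  rw [PySem.Dict.keys_foldl_insert l (fun _ _ => 0) PySem.Dict.empty, PySem.Dict.keys_empty,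
    PySem.Set.update_nil_left, PySem.Set.ofList_eq_self_of_nodup _ hnd]

-- ===== A-side fold characterisation =====
theorem pvA_inner_notmem (l : List (String × List String)) (w : String) (c : Int) (k : String)
    (hk : k ∉ l.map Prod.fst) (d : PySem.Dict String Int) :
    (l.foldl (fun d p => if w ∈ p.2 then d.modify p.1 0 (· + c) else d) d).getD k 0 = d.getD k 0 := by
  induction l generalizing d with
  | nil => rfl
  | cons p ps ih =>
      simp only [List.map_cons, List.mem_cons, not_or] at hk
      simp only [List.foldl_cons]
      rw [ih hk.2]
      split
      · exact PySem.Dict.getD_modify_of_ne _ _ _ hk.1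
      · rfl

theorem pvA_inner (l : List (String × List String)) (w : String) (c : Int) (k : String)
    (W : List String) (hnd : (l.map Prod.fst).Nodup) (hkW : (k, W) ∈ l) (d : PySem.Dict String Int) :
    (l.foldl (fun d p => if w ∈ p.2 then d.modify p.1 0 (· + c) else d) d).getD k 0
      = d.getD k 0 + (if w ∈ W then c else 0) := by
  induction l generalizing d with
  | nil => cases hkW
  | cons p ps ih =>
      simp only [List.map_cons, List.nodup_cons] at hnd
      rcases List.mem_cons.mp hkW with h | h
      · have hk1 : p.1 = k := by rw [← h]
        have hknot : k ∉ ps.map Prod.fst := by rw [← hk1]; exact hnd.1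
        simp only [List.foldl_cons]
        rw [pvA_inner_notmem ps w c k hknot]
        rw [← h]
        split
        · rw [PySem.Dict.getD_modify_self]
        · simp
      · have hk1 : k ∈ ps.map Prod.fst := List.mem_map_of_mem h
        have hne : k ≠ p.1 := fun he => hnd.1 (he ▸ hk1)
        simp only [List.foldl_cons]
        rw [ih hnd.2 h]
        congr 1
        split
        · exact PySem.Dict.getD_modify_of_ne _ _ _ hne
        · rfl

theorem pvA_outer (ps : List (String × Int)) (l : List (String × List String)) (k : String)
    (W : List String) (hnd : (l.map Prod.fst).Nodup) (hkW : (k, W) ∈ l) (d : PySem.Dict String Int) :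
    (ps.foldl (fun d pair =>
        l.foldl (fun d p => if pair.1 ∈ p.2 then d.modify p.1 0 (· + pair.2) else d) d) d).getD k 0
      = d.getD k 0 + (ps.map (fun pr => if pr.1 ∈ W then pr.2 else 0)).sum := by
  induction ps generalizing d with
  | nil => simp
  | cons pr ps ih =>
      simp only [List.foldl_cons, List.map_cons, List.sum_cons]
      rw [ih _, pvA_inner l pr.1 pr.2 k W hnd hkW d]
      ring

theorem pvA_inner_keys (l : List (String × List String)) (w : String) (c : Int)
    (d : PySem.Dict String Int) (h : ∀ p ∈ l, p.1 ∈ d.keys) :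
    (l.foldl (fun d p => if w ∈ p.2 then d.modify p.1 0 (· + c) else d) d).keys = d.keys := by
  induction l generalizing d with
  | nil => rfl
  | cons p ps ih =>
      simp only [List.foldl_cons]
      have hstep : (if w ∈ p.2 then d.modify p.1 0 (· + c) else d).keys = d.keys := by
        split
        · rw [PySem.Dict.keys_modify, PySem.Dict.keys_insert_of_contains]
          exact (PySem.Dict.contains_iff_mem_keys _ _).mpr (h p (List.mem_cons_self ..))
        · rfl
      rw [ih _ (fun q hq => by rw [hstep]; exact h q (List.mem_cons_of_mem _ hq))]
      exact hstep

theorem pvA_outer_keys (ps : List (String × Int)) (l : List (String × List String))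
    (d : PySem.Dict String Int) (h : ∀ p ∈ l, p.1 ∈ d.keys) :
    (ps.foldl (fun d pair =>
        l.foldl (fun d p => if pair.1 ∈ p.2 then d.modify p.1 0 (· + pair.2) else d) d) d).keys
      = d.keys := by
  induction ps generalizing d with
  | nil => rfl
  | cons pr ps ih =>
      simp only [List.foldl_cons]
      have hstep := pvA_inner_keys l pr.1 pr.2 d h
      rw [ih _ (fun q hq => by rw [hstep]; exact h q hq), hstep]

-- ===== summation exchange (the heart of the equivalence) =====
-- Σ_{w∈S} [w∈T] f w over a conditional map equals the sum of f over the filter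
theorem pvSum_if_filter (S T : List String) (f : String → Int) :
    (S.map (fun w => if w ∈ T then f w else 0)).sum
      = ((S.filter (fun w => decide (w ∈ T))).map f).sum := by
  induction S with
  | nil => rfl
  | cons x xs ih =>
      by_cases h : x ∈ T <;>
        simp [h, ih]

-- exchanging the index set of a conditional sum between two duplicate-free lists
theorem pvSum_swap (S T : List String) (f : String → Int) (hS : S.Nodup) (hT : T.Nodup) :
    (S.map (fun w => if w ∈ T then f w else 0)).sum
      = (T.map (fun k => if k ∈ S then f k else 0)).sum := by
  rw [pvSum_if_filter S T f, pvSum_if_filter T S f]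
  have hperm : (S.filter (fun w => decide (w ∈ T))).Perm (T.filter (fun k => decide (k ∈ S))) := by
    rw [List.perm_ext_iff_of_nodup (hS.filter _) (hT.filter _)]
    intro a
    simp only [List.mem_filter, decide_eq_true_eq]
    tauto
  exact (hperm.map f).sum_eq

-- ===== sorted lemma =====
theorem pvSorted_map (us : List String) (v : String → Int) (hnd : us.Nodup) :
    PySem.List.sorted (us.map (fun k => (k, v k))) (fun t => t.1) false
      = (PySem.List.sorted us (fun k => k) false).map (fun k => (k, v k)) := by
  apply PySem.List.sorted_eq_of_perm_of_pairwise_lt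
  · exact (PySem.List.sorted_perm us (fun k => k) false).map _
  · have hperm := PySem.List.sorted_perm us (fun k => k) false
    have hpair : (PySem.List.sorted us (fun k => k) false).Pairwise (fun a b => a ≤ b) :=
      PySem.List.sorted_pairwise us (fun k => k)
    have hndS : (PySem.List.sorted us (fun k => k) false).Nodup := hperm.nodup_iff.mpr hnd
    have hlt : (PySem.List.sorted us (fun k => k) false).Pairwise (fun a b => a < b) :=
      (hpair.and hndS).imp (fun h => lt_of_le_of_ne h.1 h.2)
    exact hlt.map _ (fun a b h => by simpa using h)

-- ===== VERDICT (by name: the statement is the Claim_ definition above) =====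
theorem score_one_document_tf_spec : Claim_equal_score_one_document_tf := by
  intro document expanded_words list_of_list _hdom
  simp only [Spec_score_one_document_tf, score_one_document_tf, score_one_document_tf_alt]
  set doc := pvTokens document list_of_list with hdoc
  set ew : PySem.Dict String (List String) := PySem.Dict.ofList expanded_words with hew
  set base : PySem.Dict String Int := ew.keys.foldl (fun d k => d.insert k 0) PySem.Dict.empty with hbase
  set dc := (PySem.Dict.counter doc).items.foldl (fun d pair =>
      ew.items.foldl (fun d p => if pair.1 ∈ p.2 then d.modify p.1 0 (· + pair.2) else d) d) base with hdc
  have hndk : ew.keys.Nodup := PySem.Dict.nodup_keys_ofList expanded_words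
  have hfst : ew.keys = ew.items.map Prod.fst := rfl
  have hndfst : (ew.items.map Prod.fst).Nodup := hfst ▸ hndk
  have hbkeys : base.keys = ew.keys := pvBase_keys _ hndk
  have hbget : ∀ k, base.getD k 0 = 0 := fun k =>
    pvBase_getD _ _ _ (PySem.Dict.getD_empty _ _)
  have hAk : dc.keys = ew.keys := by
    rw [hdc, pvA_outer_keys _ _ _ (fun p hp => by
      rw [hbkeys, hfst]; exact List.mem_map_of_mem hp)]
    exact hbkeys
  have hAnodup : dc.keys.Nodup := hAk ▸ hndk
  have hitems : dc.items = ew.keys.map (fun k => (k, dc.getD k 0)) := by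
    rw [PySem.Dict.items_eq_map_keys dc hAnodup 0, hAk]
  rw [hitems, pvSorted_map ew.keys _ hndk, List.map_map]
  congr 1
  apply List.map_congr_left
  intro a ha
  have ha' : a ∈ ew.keys := (PySem.List.mem_sorted ew.keys (fun k => k) false a).mp ha
  rw [hfst] at ha'
  obtain ⟨p, hp, hpk⟩ := List.mem_map.mp ha'
  obtain ⟨a', W⟩ := p
  simp only at hpk
  subst hpk
  have hkW : (a', W) ∈ ew.items := hp
  have hWget : ew.getD a' [] = W := PySem.Dict.getD_of_mem_items ew hkW hndk []
  -- A's value for key a'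
  have hA : dc.getD a' 0
      = ((PySem.Dict.counter doc).items.map (fun pr => if pr.1 ∈ W then pr.2 else 0)).sum := by
    rw [hdc, pvA_outer _ ew.items a' W hndfst hkW base, hbget a']
    ring
  simp only [Function.comp, hA, hWget]
  -- rewrite A's sum over counter items as a conditional sum over the distinct tokens
  rw [PySem.Dict.items_counter doc, List.map_map]
  have hAform : ((PySem.Set.ofList doc).map
        ((fun pr => if pr.1 ∈ W then pr.2 else 0) ∘ fun k => (k, (doc.count k : Int)))).sum
      = ((PySem.Set.ofList doc).map
        (fun k => if k ∈ PySem.Set.ofList W then (doc.count k : Int) else 0)).sum := by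
    apply congrArg
    apply List.map_congr_left
    intro k _
    simp only [Function.comp]
    by_cases h : k ∈ W
    · rw [if_pos h, if_pos ((PySem.Set.mem_ofList W k).mpr h)]
    · rw [if_neg h, if_neg (fun hh => h ((PySem.Set.mem_ofList W k).mp hh))]
  rw [hAform, pvSum_swap _ _ _ (PySem.Set.nodup_ofList doc) (PySem.Set.nodup_ofList W)]
  -- B's sum: counter lookups of the distinct words of W
  apply congrArg
  apply List.map_congr_left
  intro w _
  rw [PySem.Dict.getD_counter]
  by_cases h : w ∈ PySem.Set.ofList doc
  · rw [if_pos h]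
  · rw [if_neg h]
    have : doc.count w = 0 :=
      List.count_eq_zero.mpr (fun hm => h ((PySem.Set.mem_ofList doc w).mpr hm))
    simp [this]
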